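-- pv_equiv track=rewrite | github.com/MarcTu/projet1 | projet1_v3.py | anomalie_list
-- ===== SOURCE A (Python) =====
-- def derive(L,T):                # Il faut que len(T)=len(L)>0
--     l=[]
--     n=len(L)
--     for k in range(n-1):
--         x=(float(L[k+1])-float(L[k]))/(float(T[k+1])-float(T[k]))
--         l.append(x)
--     return l
--
-- def vitesse(L,T):
--     return derive(L,T)
--
-- def acceleration(L,T):
--     n=len(T)-1
--     return vitesse(vitesse(L,T),T[0:n])
--
-- e=1000
--
-- def is_anomalie2(acc,id):          # acc=acceleration(col,date2)
--     if abs(acc[id])>e: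
--         return True
--     return False
--
-- def anomalie_list(col,T):
--     index=[]
--     value=[]
--     acc=acceleration(col,T)
--     for i in range(len(col)-2):
--         if is_anomalie2(acc,i):
--             index.append(i)
--             value.append(col[i])
--     return index,value
-- ===== SOURCE B (Python) =====
-- # B: fused single pass -- compute the second-derivative value directly per index,
-- # no intermediate velocity/acceleration arrays, no helper chain.
-- def anomalie_list(col, T):
--     def _acc(i):
--         t10 = float(T[i+1]) - float(T[i])
--         vi = (float(col[i+1]) - float(col[i])) / t10
--         vi1 = (float(col[i+2]) - float(col[i+1])) / (float(T[i+2]) - float(T[i+1]))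
--         return (vi1 - vi) / t10
--     hits = [i for i in range(len(col) - 2) if abs(_acc(i)) > 1000]
--     return hits, [col[i] for i in hits]
-- ===== Notes on version B (the rewrite author's own statement) =====
-- stated objective: simpler
-- what changed: B fuses the derive/vitesse/acceleration helper chain into one direct second-derivative formula per index and builds the result with two comprehensions instead of intermediate velocity and acceleration arrays plus an accumulating loop.
import Mathlib
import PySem

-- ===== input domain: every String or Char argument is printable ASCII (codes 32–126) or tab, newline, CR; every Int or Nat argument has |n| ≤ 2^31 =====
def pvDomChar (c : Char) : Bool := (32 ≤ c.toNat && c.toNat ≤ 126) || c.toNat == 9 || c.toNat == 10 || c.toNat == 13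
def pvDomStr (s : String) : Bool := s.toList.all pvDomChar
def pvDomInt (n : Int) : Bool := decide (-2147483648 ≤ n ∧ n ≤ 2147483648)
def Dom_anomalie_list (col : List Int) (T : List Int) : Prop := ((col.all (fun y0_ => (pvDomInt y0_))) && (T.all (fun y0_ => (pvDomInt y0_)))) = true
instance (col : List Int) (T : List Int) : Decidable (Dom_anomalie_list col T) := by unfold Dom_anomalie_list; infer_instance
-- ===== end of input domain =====

-- B fuses A's derive/vitesse/acceleration helper chain into one direct per-index
-- second-derivative formula and builds the result with a filter + two maps (objective: simpler).
-- All float() arithmetic is ported with Lean's IEEE-754 Float; indices in both ports are the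
-- nonnegative in-range indices the Python uses, so List.getD with a junk default is exact inside Pre_.

-- ===== PORT A =====
-- derive(L,T): the float() casts on the first call are applied once by mapping Float.ofInt
-- over the lists before calling (float() is the identity on the float lists of the second call).
def pvDerive (L T : List Float) : List Float :=
  (List.range (L.length - 1)).foldl
    (fun l k => l ++ [((L.getD (k+1) 0) - (L.getD k 0)) / ((T.getD (k+1) 0) - (T.getD k 0))]) []

def pvVitesse (L T : List Float) : List Float := pvDerive L T

def pvAcceleration (L T : List Float) : List Float :=
  pvVitesse (pvVitesse L T) (T.take (T.length - 1))

def pvE : Float := 1000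

def pvIsAnomalie2 (acc : List Float) (id : Nat) : Bool :=
  if (acc.getD id 0).abs > pvE then true else false

def anomalie_list (col : List Int) (T : List Int) : List Int × List Int :=
  let acc := pvAcceleration (col.map Float.ofInt) (T.map Float.ofInt)
  (List.range (col.length - 2)).foldl
    (fun p i => if pvIsAnomalie2 acc i then (p.1 ++ [(i : Int)], p.2 ++ [col.getD i 0]) else p)
    ([], [])

-- ===== PORT B =====
def altAcc (col T : List Int) (i : Nat) : Float :=
  let t10 := Float.ofInt (T.getD (i+1) 0) - Float.ofInt (T.getD i 0)
  let vi := (Float.ofInt (col.getD (i+1) 0) - Float.ofInt (col.getD i 0)) / t10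
  let vi1 := (Float.ofInt (col.getD (i+2) 0) - Float.ofInt (col.getD (i+1) 0)) /
             (Float.ofInt (T.getD (i+2) 0) - Float.ofInt (T.getD (i+1) 0))
  (vi1 - vi) / t10

def anomalie_list_alt (col : List Int) (T : List Int) : List Int × List Int :=
  let hits := (List.range (col.length - 2)).filter (fun i => (altAcc col T i).abs > 1000)
  (hits.map (fun i => (i : Int)), hits.map (fun i => col.getD i 0))

-- ===== PRECONDITION & SPEC =====
-- Pre_ excludes exactly the inputs where Python A raises: an IndexError when T is shorter than
-- col (with at least 2 samples), and a ZeroDivisionError when two consecutive timestamps are equal.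
def Pre_anomalie_list (col : List Int) (T : List Int) : Prop :=
  (col.length ≤ 1 ∨ col.length ≤ T.length) ∧
  (∀ k : Nat, k < col.length - 1 → T.getD (k+1) 0 ≠ T.getD k 0)

instance (col : List Int) (T : List Int) : Decidable (Pre_anomalie_list col T) := by
  unfold Pre_anomalie_list; infer_instance

def pvWitness_anomalie_list : List Int × List Int := ([0, 0, 5000, 0], [0, 1, 2, 3])

def Spec_anomalie_list (col : List Int) (T : List Int) (out : List Int × List Int) : Prop := out = anomalie_list_alt col T
instance (col : List Int) (T : List Int) (out : List Int × List Int) : Decidable (Spec_anomalie_list col T out) := by unfold Spec_anomalie_list; infer_instance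

-- ===== CLAIM (what is proved, stated in full; the proofs are below) =====
def Claim_equal_anomalie_list : Prop := ∀ (col : List Int) (T : List Int), Dom_anomalie_list col T → Pre_anomalie_list col T → Spec_anomalie_list col T (anomalie_list col T)

-- ===== LEMMAS AND PROOFS =====

theorem pv_foldl_append_map (f : Nat → Float) :
    ∀ (xs : List Nat) (acc : List Float),
      xs.foldl (fun l k => l ++ [f k]) acc = acc ++ xs.map f := by
  intro xs
  induction xs with
  | nil => simp
  | cons x xs ih => intro acc; simp [List.foldl_cons, ih]

theorem pvDerive_eq_map (L T : List Float) :
    pvDerive L T = (List.range (L.length - 1)).map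
      (fun k => ((L.getD (k+1) 0) - (L.getD k 0)) / ((T.getD (k+1) 0) - (T.getD k 0))) := by
  unfold pvDerive
  rw [pv_foldl_append_map (fun k => ((L.getD (k+1) 0) - (L.getD k 0)) / ((T.getD (k+1) 0) - (T.getD k 0)))]
  simp

theorem pvDerive_length (L T : List Float) : (pvDerive L T).length = L.length - 1 := by
  simp [pvDerive_eq_map]

theorem pvDerive_getD (L T : List Float) (k : Nat) (hk : k < L.length - 1) :
    (pvDerive L T).getD k 0 =
      ((L.getD (k+1) 0) - (L.getD k 0)) / ((T.getD (k+1) 0) - (T.getD k 0)) := by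
  rw [pvDerive_eq_map, List.getD_eq_getElem _ _ (by simpa using hk)]
  simp

theorem pv_getD_map_toFloat (xs : List Int) (k : Nat) (hk : k < xs.length) :
    (xs.map Float.ofInt).getD k 0 = Float.ofInt (xs.getD k 0) := by
  rw [List.getD_eq_getElem _ _ (by simpa using hk), List.getD_eq_getElem _ _ hk]
  simp

theorem pv_getD_take (xs : List Float) (n k : Nat) (hk : k < n) (hn : k < xs.length) :
    (xs.take n).getD k 0 = xs.getD k 0 := by
  rw [List.getD_eq_getElem _ _ (by simp; omega), List.getD_eq_getElem _ _ hn]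
  simp

-- Under in-range indices, A's precomputed acceleration entry is B's fused formula.
theorem pvAcc_getD (col T : List Int) (hT : col.length ≤ T.length) (i : Nat)
    (hi : i + 2 < col.length) :
    (pvAcceleration (col.map Float.ofInt) (T.map Float.ofInt)).getD i 0 = altAcc col T i := by
  have hvlen : (pvDerive (col.map Float.ofInt) (T.map Float.ofInt)).length = col.length - 1 := by
    simp [pvDerive_length]
  have hv : ∀ j : Nat, j + 1 < col.length →
      (pvDerive (col.map Float.ofInt) (T.map Float.ofInt)).getD j 0 =
        (Float.ofInt (col.getD (j+1) 0) - Float.ofInt (col.getD j 0)) /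
        (Float.ofInt (T.getD (j+1) 0) - Float.ofInt (T.getD j 0)) := by
    intro j hj
    rw [pvDerive_getD _ _ j (by simp; omega)]
    rw [pv_getD_map_toFloat col (j+1) (by omega), pv_getD_map_toFloat col j (by omega),
        pv_getD_map_toFloat T (j+1) (by omega), pv_getD_map_toFloat T j (by omega)]
  unfold pvAcceleration pvVitesse
  rw [pvDerive_getD _ _ i (by rw [hvlen]; omega)]
  rw [hv (i+1) (by omega), hv i (by omega)]
  have hlen : (T.map Float.ofInt).length = T.length := by simp
  rw [pv_getD_take _ _ (i+1) (by omega) (by rw [hlen]; omega),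
      pv_getD_take _ _ i (by omega) (by rw [hlen]; omega)]
  rw [pv_getD_map_toFloat T (i+1) (by omega), pv_getD_map_toFloat T i (by omega)]
  simp [altAcc]

theorem pv_fold_filter (c c' : Nat → Bool) (f : Nat → Int) (g : Nat → Int) :
    ∀ (xs : List Nat) (a b : List Int), (∀ x ∈ xs, c x = c' x) →
      xs.foldl (fun p i => if c i then (p.1 ++ [f i], p.2 ++ [g i]) else p) (a, b) =
        (a ++ (xs.filter c').map f, b ++ (xs.filter c').map g) := by
  intro xs
  induction xs with
  | nil => simp
  | cons x xs ih =>
    intro a b h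
    have hx : c x = c' x := h x (by simp)
    by_cases hc : c' x
    · simp only [List.foldl_cons, hx, hc, if_true, List.filter_cons_of_pos hc]
      rw [ih _ _ (fun y hy => h y (by simp [hy]))]
      simp
    · simp only [List.foldl_cons, hx, hc, if_false, Bool.false_eq_true,
        List.filter_cons_of_neg (by simpa using hc)]
      exact ih _ _ (fun y hy => h y (by simp [hy]))

-- ===== VERDICT (by name: the statement is the Claim_ definition above) =====
theorem anomalie_list_spec : Claim_equal_anomalie_list := by
  intro col T _hdom hpre
  unfold Spec_anomalie_list anomalie_list anomalie_list_alt
  have hcond : ∀ i ∈ List.range (col.length - 2),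
      pvIsAnomalie2 (pvAcceleration (col.map Float.ofInt) (T.map Float.ofInt)) i =
        decide ((altAcc col T i).abs > 1000) := by
    intro i hi
    have hi' : i + 2 < col.length := by
      have := List.mem_range.mp hi; omega
    have hT : col.length ≤ T.length := by
      rcases hpre.1 with h | h
      · omega
      · exact h
    simp only [pvIsAnomalie2, pvAcc_getD col T hT i hi', pvE]
    by_cases h : (altAcc col T i).abs > 1000 <;> simp [h]
  rw [pv_fold_filter
        (fun i => pvIsAnomalie2 (pvAcceleration (col.map Float.ofInt) (T.map Float.ofInt)) i)
        (fun i => decide ((altAcc col T i).abs > 1000))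
        (fun i => (i : Int)) (fun i => col.getD i 0)
        (List.range (col.length - 2)) [] [] hcond]
  simp [List.map_eq_flatMap]
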